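-- pv_equiv track=rewrite | github.com/leechangsu2131/my-skills | skills/teacher-guide-subunit-splitter/scripts/split_subunits_from_plan_table.py | halve_duplicate_runs
-- ===== SOURCE A (Python) =====
-- def halve_duplicate_runs(text: str) -> str:
--     if not text:
--         return text
--
--     parts: list[str] = []
--     index = 0
--     while index < len(text):
--         next_index = index + 1
--         while next_index < len(text) and text[next_index] == text[index]:
--             next_index += 1
--         run_length = next_index - index
--         if run_length >= 2 and run_length % 2 == 0:
--             parts.append(text[index] * (run_length // 2))
--         else:
--             parts.append(text[index] * run_length)
--         index = next_index
--     return "".join(parts)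
-- ===== SOURCE B (Python) =====
-- import re
--
-- def halve_duplicate_runs(text: str) -> str:
--     # Let the regex engine segment the text into maximal runs of one character;
--     # the replacement callback truncates each even-length run to its first half.
--     def repl(m):
--         run = m.group(0)
--         L = len(run)
--         return run[:L // 2] if L % 2 == 0 else run
--     return re.sub(r'(.)\1*', repl, text, flags=re.DOTALL)
-- ===== Notes on version B (the rewrite author's own statement) =====
-- stated objective: idiomatic
-- what changed: Replaced the manual nested index-scanning loops with a single re.sub over the pattern (.)\1* so the regex engine finds each maximal run and a callback truncates even-length runs to their first half.
import Mathlib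
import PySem

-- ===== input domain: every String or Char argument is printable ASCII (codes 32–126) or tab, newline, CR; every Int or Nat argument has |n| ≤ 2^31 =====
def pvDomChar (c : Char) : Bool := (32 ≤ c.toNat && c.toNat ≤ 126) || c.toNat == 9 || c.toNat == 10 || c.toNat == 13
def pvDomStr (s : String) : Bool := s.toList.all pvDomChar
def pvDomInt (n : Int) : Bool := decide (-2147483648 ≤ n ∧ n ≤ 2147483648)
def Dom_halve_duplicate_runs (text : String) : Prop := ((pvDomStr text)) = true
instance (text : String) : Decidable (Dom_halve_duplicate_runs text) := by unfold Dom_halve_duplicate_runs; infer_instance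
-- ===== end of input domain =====

-- B replaces A's manual nested index loops with a regex substitution re.sub(r'(.)\1*', repl)
-- whose callback halves even-length runs (idiomatic, same cost).


-- ===== PORT A =====
-- inner `while next_index < len(text) and text[next_index] == text[index]` loop
def pvAInner (s : List Char) (index : Nat) (next : Nat) : Nat :=
  if _h : next < s.length then
    if s[next]! == s[index]! then pvAInner s index (next + 1) else next
  else next
termination_by s.length - next

theorem pvAInner_gt (s : List Char) (index next : Nat) : next ≤ pvAInner s index next := by
  unfold pvAInner
  split
  · split
    · exact le_trans (Nat.le_succ _) (pvAInner_gt s index (next + 1))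
    · exact le_refl _
  · exact le_refl _
termination_by s.length - next

-- outer `while index < len(text)` loop, accumulating `parts`
def pvAOuter (s : List Char) (index : Nat) (parts : List String) : List String :=
  if _h : index < s.length then
    let next := pvAInner s index (index + 1)
    let runLength := next - index
    let piece :=
      if runLength ≥ 2 ∧ runLength % 2 = 0 then
        String.ofList (List.replicate (runLength / 2) s[index]!)
      else
        String.ofList (List.replicate runLength s[index]!)
    pvAOuter s next (parts ++ [piece])
  else parts
termination_by s.length - index
decreasing_by
  have := pvAInner_gt s index (index + 1)
  omega

def halve_duplicate_runs (text : String) : String :=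
  if text = "" then text
  else String.join (pvAOuter text.toList 0 [])

-- ===== PORT B =====
-- the replacement callback `repl`: run[:L//2] if L even else run
def pvRepl (m : List Char) : List Char :=
  let L := m.length
  if L % 2 = 0 then m.take (L / 2) else m

-- re.sub scanning: at each position the pattern (.)\1* greedily matches the maximal
-- run of the current character; its replacement is emitted and scanning resumes after it.
def pvReSub : List Char → List Char
  | [] => []
  | c :: t =>
    let m := c :: t.takeWhile (· == c)      -- the match m.group(0): maximal run at this position
    pvRepl m ++ pvReSub (t.drop (t.takeWhile (· == c)).length)
termination_by l => l.length
decreasing_by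
  have := List.length_drop (l := t) (i := (t.takeWhile (· == c)).length)
  simp only [List.length_cons]
  omega

def halve_duplicate_runs_alt (text : String) : String :=
  String.ofList (pvReSub text.toList)

-- ===== PRECONDITION & SPEC =====
def Spec_halve_duplicate_runs (text : String) (out : String) : Prop := out = halve_duplicate_runs_alt text
instance (text : String) (out : String) : Decidable (Spec_halve_duplicate_runs text out) := by unfold Spec_halve_duplicate_runs; infer_instance

-- ===== CLAIM (what is proved, stated in full; the proofs are below) =====
def Claim_equal_halve_duplicate_runs : Prop := ∀ (text : String), Dom_halve_duplicate_runs text → Spec_halve_duplicate_runs text (halve_duplicate_runs text)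

-- ===== LEMMAS AND PROOFS =====

-- canonical run-length encoding, the common normal form of both ports
def pvRuns : List Char → List (Char × Nat)
  | [] => []
  | c :: t =>
    (c, 1 + (t.takeWhile (· == c)).length) :: pvRuns (t.drop (t.takeWhile (· == c)).length)
termination_by l => l.length
decreasing_by
  have := List.length_drop (l := t) (i := (t.takeWhile (· == c)).length)
  simp only [List.length_cons]
  omega

-- the piece A builds for a run of length n of character c
def pvPieceA (c : Char) (n : Nat) : String :=
  if n ≥ 2 ∧ n % 2 = 0 then String.ofList (List.replicate (n / 2) c)
  else String.ofList (List.replicate n c)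

theorem pvAInner_eq (s : List Char) (index next : Nat) :
    pvAInner s index next =
      next + ((s.drop next).takeWhile (fun ch => ch == s[index]!)).length := by
  unfold pvAInner
  split
  · next h =>
    rw [List.drop_eq_getElem_cons h]
    have hg : s[next]! = s[next] := getElem!_pos s next h
    by_cases hc : s[next]! == s[index]!
    · rw [if_pos hc]
      simp only [List.takeWhile_cons, hg ▸ hc, if_pos]
      rw [pvAInner_eq s index (next + 1)]
      simp only [List.length_cons]
      omega
    · rw [if_neg hc]
      rw [hg] at hc
      simp only [Bool.not_eq_true] at hc
      simp only [List.takeWhile_cons, hc, Bool.false_eq_true, if_false, List.length_nil]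
      omega
  · next h =>
    rw [List.drop_eq_nil_of_le (Nat.le_of_not_lt h)]
    simp
termination_by s.length - next

theorem pvAOuter_eq (s : List Char) (index : Nat) (parts : List String) :
    pvAOuter s index parts =
      parts ++ (pvRuns (s.drop index)).map (fun p => pvPieceA p.1 p.2) := by
  unfold pvAOuter
  split
  · next h =>
    have hg : s[index]! = s[index] := getElem!_pos s index h
    have hdrop : s.drop index = s[index] :: s.drop (index + 1) := List.drop_eq_getElem_cons h
    have hinner := pvAInner_eq s index (index + 1)
    set k := ((s.drop (index + 1)).takeWhile (fun ch => ch == s[index]!)).length with hk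
    have hnext : pvAInner s index (index + 1) = index + 1 + k := hinner
    have hrl : pvAInner s index (index + 1) - index = 1 + k := by omega
    rw [pvAOuter_eq s (pvAInner s index (index + 1)) _]
    rw [hdrop]
    rw [pvRuns]
    have hkk : ((s.drop (index + 1)).takeWhile (· == s[index])).length = k := by
      rw [hk, hg]
    have hdd : (s.drop (index + 1)).drop ((s.drop (index + 1)).takeWhile (· == s[index])).length
        = s.drop (pvAInner s index (index + 1)) := by
      rw [hkk, List.drop_drop]
      congr 1
      omega
    rw [List.map_cons, hdd]
    simp only [List.append_assoc, List.singleton_append]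
    congr 2
    rw [hrl, hg, hkk]
    rfl
  · next h =>
    rw [List.drop_eq_nil_of_le (Nat.le_of_not_lt h)]
    simp [pvRuns]
termination_by s.length - index
decreasing_by
  have := pvAInner_gt s index (index + 1)
  omega

-- takeWhile (· == c) only keeps copies of c
theorem pvTakeWhile_replicate (t : List Char) (c : Char) :
    t.takeWhile (· == c) = List.replicate (t.takeWhile (· == c)).length c := by
  induction t with
  | nil => rfl
  | cons a t ih =>
    by_cases h : a == c
    · have ha : a = c := beq_iff_eq.mp h
      subst ha
      rw [List.takeWhile_cons, if_pos (beq_self_eq_true a)]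
      simp only [List.length_cons, List.replicate_succ]
      exact congrArg (a :: ·) ih
    · simp [h]

-- B's piece for each run coincides with A's piece
theorem pvRepl_eq (c : Char) (n : Nat) :
    String.ofList (pvRepl (List.replicate n c)) = pvPieceA c n := by
  unfold pvRepl pvPieceA
  simp only [List.length_replicate]
  by_cases h : n % 2 = 0
  · rw [if_pos h]
    by_cases h0 : n = 0
    · subst h0; rw [if_neg (by omega)]; rfl
    · rw [if_pos ⟨by omega, h⟩, List.take_replicate]
      congr 2
      omega
  · rw [if_neg h, if_neg (by omega)]

-- B's scan is the flattening of the per-run pieces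
theorem pvReSub_eq (s : List Char) :
    pvReSub s = ((pvRuns s).map (fun p => pvRepl (List.replicate p.2 p.1))).flatten := by
  induction s using pvReSub.induct with
  | case1 => simp [pvReSub, pvRuns]
  | case2 c t ih =>
    rw [pvReSub, pvRuns, List.map_cons, List.flatten_cons]
    have hm : (c :: t.takeWhile (· == c))
        = List.replicate (1 + (t.takeWhile (· == c)).length) c := by
      conv_lhs => rw [pvTakeWhile_replicate t c]
      rw [Nat.add_comm, List.replicate_succ]
    rw [ih]
    show pvRepl (c :: t.takeWhile (· == c)) ++ _ = _
    rw [hm]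

-- String.join of per-character-list strings is the string of the flattening
theorem pvJoin_ofList (l : List (List Char)) :
    String.join (l.map String.ofList) = String.ofList l.flatten := by
  rw [String.join_eq]
  simp [List.map_map, Function.comp_def]

-- ===== VERDICT (by name: the statement is the Claim_ definition above) =====
theorem halve_duplicate_runs_spec : Claim_equal_halve_duplicate_runs := by
  intro text _
  unfold Spec_halve_duplicate_runs halve_duplicate_runs halve_duplicate_runs_alt
  by_cases he : text = ""
  · subst he; simp [pvReSub]
  · rw [if_neg he, pvAOuter_eq, pvReSub_eq]
    rw [List.nil_append, List.drop_zero]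
    rw [← pvJoin_ofList, List.map_map]
    congr 1
    apply List.map_congr_left
    intro p _
    show pvPieceA p.1 p.2 = String.ofList (pvRepl (List.replicate p.2 p.1))
    exact (pvRepl_eq p.1 p.2).symm
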